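-- pv_equiv track=rewrite | github.com/whiprandolph/bestseller | toc.py | make_toc
-- ===== SOURCE A (Python) =====
-- def make_toc(toc_links, idx, depth, need_map):
--   indent_level = toc_links[idx][1]
--   md = ""
--   while idx < len(toc_links) and toc_links[idx][1] >= indent_level:
--     if toc_links[idx][1] == indent_level:
--       md += depth * 2 * " " + "* %s\n" % toc_links[idx][0]
--       need = need_map.get(toc_links[idx][0])
--       if need:
--         md += ((depth * 2) + 2) * " " + "* %s\n" % need
--       idx+=1
--     else:
--       new_md, idx = make_toc(toc_links, idx, depth+1, need_map)
--       md += new_md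
--   return md, idx
-- ===== SOURCE B (Python) =====
-- def make_toc(toc_links, idx, depth, need_map):
--     # Iterative: one pass with an explicit stack of open indent levels
--     # instead of A's recursion.
--     base = toc_links[idx][1]
--     stack = [base]
--     md = ""
--     i = idx
--     while i < len(toc_links) and toc_links[i][1] >= base:
--         cur = toc_links[i][1]
--         while stack[-1] > cur:
--             stack.pop()
--         if cur > stack[-1]:
--             stack.append(cur)
--         d = depth + len(stack) - 1
--         md += d * 2 * " " + "* %s\n" % toc_links[i][0]
--         need = need_map.get(toc_links[i][0])
--         if need:
--             md += (d * 2 + 2) * " " + "* %s\n" % need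
--         i += 1
--     return md, i
-- ===== Notes on version B (the rewrite author's own statement) =====
-- stated objective: alternative
-- what changed: Replaces A's while-loop-with-recursive-self-calls by a single iterative pass that keeps an explicit stack of open indent levels and emits each line at depth depth+len(stack)-1.
import Mathlib
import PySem

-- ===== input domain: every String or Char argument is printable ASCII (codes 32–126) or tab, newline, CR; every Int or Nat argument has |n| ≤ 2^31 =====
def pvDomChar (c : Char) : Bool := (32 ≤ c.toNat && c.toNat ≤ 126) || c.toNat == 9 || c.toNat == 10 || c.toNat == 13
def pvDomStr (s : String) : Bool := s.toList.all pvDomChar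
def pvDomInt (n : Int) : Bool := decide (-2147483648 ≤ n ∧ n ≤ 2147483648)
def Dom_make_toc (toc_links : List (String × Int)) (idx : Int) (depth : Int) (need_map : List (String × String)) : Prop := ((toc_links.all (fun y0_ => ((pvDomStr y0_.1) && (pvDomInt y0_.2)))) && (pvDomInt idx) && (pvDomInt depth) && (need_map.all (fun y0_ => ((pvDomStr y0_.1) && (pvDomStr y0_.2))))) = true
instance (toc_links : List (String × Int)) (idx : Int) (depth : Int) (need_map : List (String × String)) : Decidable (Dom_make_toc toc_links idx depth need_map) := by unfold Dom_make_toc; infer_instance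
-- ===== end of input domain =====

-- B replaces A's recursion by a single iterative pass with an explicit stack of
-- open indent levels (objective: alternative decomposition, same O(n) cost).

-- ===== PORT A =====
-- n * " " (Python string repetition; negative n gives "")
def pvSpaces (k : Int) : String := String.ofList (List.replicate k.toNat ' ')

-- need_map.get(key) on the association list (first match)
def pvDictGet : List (String × String) → String → Option String
  | [], _ => none
  | p :: rest, key => if p.1 == key then some p.2 else pvDictGet rest key

-- A is a while-loop that recursively calls make_toc; the recursion is made
-- total with a fuel parameter (fuel exhaustion is unreachable for the fuel
-- make_toc supplies, as the proofs below establish).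
mutual
def makeTocA (fuel : Nat) (toc : List (String × Int)) (idx : Int) (depth : Int) (nm : List (String × String)) : String × Int :=
  match fuel with
  | 0 => ("", idx)
  | f + 1 =>
    match PySem.List.pyGet? toc idx with
    | none => ("", idx)   -- IndexError in Python; excluded by Pre_
    | some e => loopTocA f toc e.2 idx depth nm ""

def loopTocA (fuel : Nat) (toc : List (String × Int)) (indent : Int) (idx : Int) (depth : Int) (nm : List (String × String)) (md : String) : String × Int :=
  match fuel with
  | 0 => (md, idx)
  | f + 1 =>
    if idx < (toc.length : Int) then
      match PySem.List.pyGet? toc idx with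
      | none => (md, idx)   -- unreachable: idx is in range whenever it is read
      | some e =>
        if indent ≤ e.2 then
          if e.2 = indent then
            let md1 := md ++ (pvSpaces (depth * 2) ++ ("* " ++ (e.1 ++ "\n")))
            let md2 :=
              match pvDictGet nm e.1 with
              | some s => if s = "" then md1 else md1 ++ (pvSpaces (depth * 2 + 2) ++ ("* " ++ (s ++ "\n")))
              | none => md1
            loopTocA f toc indent (idx + 1) depth nm md2
          else
            let r := makeTocA f toc idx (depth + 1) nm
            loopTocA f toc indent r.2 depth nm (md ++ r.1)
        else (md, idx)
    else (md, idx)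
end

def make_toc (toc_links : List (String × Int)) (idx : Int) (depth : Int) (need_map : List (String × String)) : String × Int :=
  makeTocA (8 * toc_links.length + 9) toc_links idx depth need_map

-- ===== PORT B =====
def loopTocB (toc : List (String × Int)) (nm : List (String × String)) (base : Int) (depth : Int) (stack : List Int) (i : Int) (md : String) : String × Int :=
  if _h : i < (toc.length : Int) then
    match PySem.List.pyGet? toc i with
    | none => (md, i)   -- unreachable: i is in range whenever it is read
    | some e =>
      if base ≤ e.2 then
        let s1 := stack.dropWhile (fun l => decide (e.2 < l))
        let s2 := if s1.headD e.2 < e.2 then e.2 :: s1 else s1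
        let d := depth + (s2.length : Int) - 1
        let md1 := md ++ (pvSpaces (d * 2) ++ ("* " ++ (e.1 ++ "\n")))
        let md2 :=
          match pvDictGet nm e.1 with
          | some s => if s = "" then md1 else md1 ++ (pvSpaces (d * 2 + 2) ++ ("* " ++ (s ++ "\n")))
          | none => md1
        loopTocB toc nm base depth s2 (i + 1) md2
      else (md, i)
  else (md, i)
termination_by ((toc.length : Int) - i).toNat
decreasing_by omega

def make_toc_alt (toc_links : List (String × Int)) (idx : Int) (depth : Int) (need_map : List (String × String)) : String × Int :=
  match PySem.List.pyGet? toc_links idx with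
  | none => ("", idx)   -- IndexError in Python; excluded by Pre_
  | some e => loopTocB toc_links need_map e.2 depth [e.2] idx ""

-- ===== PRECONDITION & SPEC =====
-- Pre_ excludes exactly the inputs where toc_links[idx] raises IndexError
-- (both A and B raise there); everything A returns on is admitted.
def Pre_make_toc (toc_links : List (String × Int)) (idx : Int) (depth : Int) (need_map : List (String × String)) : Prop :=
  -(toc_links.length : Int) ≤ idx ∧ idx < (toc_links.length : Int)
instance (toc_links : List (String × Int)) (idx : Int) (depth : Int) (need_map : List (String × String)) : Decidable (Pre_make_toc toc_links idx depth need_map) := by unfold Pre_make_toc; infer_instance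

def pvWitness_make_toc : (List (String × Int)) × Int × Int × (List (String × String)) :=
  ([("a", 0), ("b", 1), ("c", 0)], 0, 0, [("a", "x")])

def Spec_make_toc (toc_links : List (String × Int)) (idx : Int) (depth : Int) (need_map : List (String × String)) (out : String × Int) : Prop := out = make_toc_alt toc_links idx depth need_map
instance (toc_links : List (String × Int)) (idx : Int) (depth : Int) (need_map : List (String × String)) (out : String × Int) : Decidable (Spec_make_toc toc_links idx depth need_map out) := by unfold Spec_make_toc; infer_instance

-- ===== CLAIM (what is proved, stated in full; the proofs are below) =====
def Claim_equal_make_toc : Prop := ∀ (toc_links : List (String × Int)) (idx : Int) (depth : Int) (need_map : List (String × String)), Dom_make_toc toc_links idx depth need_map → Pre_make_toc toc_links idx depth need_map → Spec_make_toc toc_links idx depth need_map (make_toc toc_links idx depth need_map)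

-- ===== LEMMAS AND PROOFS =====

-- the string A/B append to md for one consumed item at effective depth d
def emitStr (nm : List (String × String)) (name : String) (d : Int) : String :=
  (pvSpaces (d * 2) ++ ("* " ++ (name ++ "\n"))) ++
  (match pvDictGet nm name with
   | some s => if s = "" then "" else pvSpaces (d * 2 + 2) ++ ("* " ++ (s ++ "\n"))
   | none => "")

theorem md2_eq (nm : List (String × String)) (name : String) (d : Int) (md : String) :
    (match pvDictGet nm name with
     | some s => if s = "" then md ++ (pvSpaces (d * 2) ++ ("* " ++ (name ++ "\n")))
                 else (md ++ (pvSpaces (d * 2) ++ ("* " ++ (name ++ "\n")))) ++ (pvSpaces (d * 2 + 2) ++ ("* " ++ (s ++ "\n")))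
     | none => md ++ (pvSpaces (d * 2) ++ ("* " ++ (name ++ "\n"))))
    = md ++ emitStr nm name d := by
  unfold emitStr
  cases pvDictGet nm name with
  | none => simp [String.append_assoc, String.append_empty]
  | some s =>
    by_cases hs : s = "" <;> simp [hs, String.append_assoc, String.append_empty]

theorem makeTocA_step (toc : List (String × Int)) (nm : List (String × String)) (i d : Int)
    (e : String × Int) (hget : PySem.List.pyGet? toc i = some e) (g : Nat) :
    makeTocA (g + 1) toc i d nm = loopTocA g toc e.2 i d nm "" := by
  simp only [makeTocA]; rw [hget]

theorem loopTocA_exit_high_step (toc : List (String × Int)) (nm : List (String × String)) (l i d : Int)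
    (h : ¬ i < (toc.length : Int)) (g : Nat) (md : String) :
    loopTocA (g + 1) toc l i d nm md = (md, i) := by
  simp only [loopTocA]; rw [if_neg h]

theorem loopTocA_exit_low_step (toc : List (String × Int)) (nm : List (String × String)) (l i d : Int)
    (e : String × Int) (hget : PySem.List.pyGet? toc i = some e)
    (hi : i < (toc.length : Int)) (hlt : e.2 < l) (g : Nat) (md : String) :
    loopTocA (g + 1) toc l i d nm md = (md, i) := by
  simp only [loopTocA]; rw [if_pos hi, hget]; simp only []
  rw [if_neg (by omega)]

theorem loopTocA_emit_step (toc : List (String × Int)) (nm : List (String × String)) (i d : Int)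
    (e : String × Int) (hget : PySem.List.pyGet? toc i = some e)
    (hi : i < (toc.length : Int)) (g : Nat) (md : String) :
    loopTocA (g + 1) toc e.2 i d nm md = loopTocA g toc e.2 (i + 1) d nm (md ++ emitStr nm e.1 d) := by
  simp only [loopTocA]; rw [if_pos hi, hget]
  simp only [le_refl, if_true]
  rw [md2_eq nm e.1 d md]

theorem loopTocA_push_step (toc : List (String × Int)) (nm : List (String × String)) (l i d : Int)
    (e : String × Int) (hget : PySem.List.pyGet? toc i = some e)
    (hi : i < (toc.length : Int)) (hlt : l < e.2) (g : Nat) (md : String) :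
    loopTocA (g + 1) toc l i d nm md =
      loopTocA g toc l (makeTocA g toc i (d + 1) nm).2 d nm (md ++ (makeTocA g toc i (d + 1) nm).1) := by
  simp only [loopTocA]; rw [if_pos hi, hget]; simp only []
  rw [if_pos (le_of_lt hlt), if_neg (by omega)]

-- "frame l, started at i with depth d, eventually returns (md ++ m, i')" (for any
-- sufficiently large fuel and any accumulated md)
def RelA (toc : List (String × Int)) (nm : List (String × String)) (l i d : Int) (m : String) (i' : Int) : Prop :=
  ∃ N : Nat, ∀ (md : String) (f : Nat), N ≤ f → loopTocA f toc l i d nm md = (md ++ m, i')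

-- the pending chain of A's recursive frames, outermost last, depths decreasing by 1
inductive ChainA (toc : List (String × Int)) (nm : List (String × String)) : List Int → Int → Int → String → Int → Prop where
  | nil (i d : Int) : ChainA toc nm [] i d "" i
  | cons {l : Int} {ls : List Int} {i d : Int} {m1 : String} {i1 : Int} {m2 : String} {i2 : Int} :
      RelA toc nm l i d m1 i1 → ChainA toc nm ls i1 (d - 1) m2 i2 → ChainA toc nm (l :: ls) i d (m1 ++ m2) i2

theorem pyGet?_some_of_range {α : Type} (xs : List α) (i : Int)
    (h1 : -(xs.length : Int) ≤ i) (h2 : i < (xs.length : Int)) :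
    ∃ e, PySem.List.pyGet? xs i = some e := by
  unfold PySem.List.pyGet? PySem.List.pyIdx?
  by_cases h0 : 0 ≤ i
  · rw [if_pos h0, if_pos h2]
    have : i.toNat < xs.length := by omega
    exact ⟨xs[i.toNat], by simp [List.getElem?_eq_getElem this]⟩
  · rw [if_neg h0, if_pos h1]
    have : xs.length - (-i).toNat < xs.length := by omega
    exact ⟨xs[xs.length - (-i).toNat], by simp [List.getElem?_eq_getElem this]⟩

theorem relA_exit_high (toc : List (String × Int)) (nm : List (String × String)) (l i d : Int)
    (h : ¬ i < (toc.length : Int)) : RelA toc nm l i d "" i := by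
  refine ⟨1, fun md f hf => ?_⟩
  obtain ⟨g, rfl⟩ : ∃ g, f = g + 1 := ⟨f - 1, by omega⟩
  rw [loopTocA_exit_high_step toc nm l i d h, String.append_empty]

theorem relA_exit_low (toc : List (String × Int)) (nm : List (String × String)) (l i d : Int)
    (e : String × Int) (hget : PySem.List.pyGet? toc i = some e)
    (hi : i < (toc.length : Int)) (hlt : e.2 < l) :
    RelA toc nm l i d "" i := by
  refine ⟨1, fun md f hf => ?_⟩
  obtain ⟨g, rfl⟩ : ∃ g, f = g + 1 := ⟨f - 1, by omega⟩
  rw [loopTocA_exit_low_step toc nm l i d e hget hi hlt, String.append_empty]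

theorem relA_emit (toc : List (String × Int)) (nm : List (String × String)) (l i d : Int)
    (e : String × Int) (hget : PySem.List.pyGet? toc i = some e)
    (hi : i < (toc.length : Int)) (heq : e.2 = l)
    (m1 : String) (i1 : Int) (h1 : RelA toc nm l (i + 1) d m1 i1) :
    RelA toc nm l i d (emitStr nm e.1 d ++ m1) i1 := by
  obtain ⟨N, hN⟩ := h1
  refine ⟨N + 1, fun md f hf => ?_⟩
  obtain ⟨g, rfl⟩ : ∃ g, f = g + 1 := ⟨f - 1, by omega⟩
  subst heq
  rw [loopTocA_emit_step toc nm i d e hget hi g md]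
  rw [hN (md ++ emitStr nm e.1 d) g (by omega), String.append_assoc]

theorem relA_push (toc : List (String × Int)) (nm : List (String × String)) (l i d : Int)
    (e : String × Int) (hget : PySem.List.pyGet? toc i = some e)
    (hi : i < (toc.length : Int)) (hlt : l < e.2)
    (m1 : String) (i1 : Int) (h1 : RelA toc nm e.2 (i + 1) (d + 1) m1 i1)
    (m2 : String) (i2 : Int) (h2 : RelA toc nm l i1 d m2 i2) :
    RelA toc nm l i d ((emitStr nm e.1 (d + 1) ++ m1) ++ m2) i2 := by
  obtain ⟨N1, hN1⟩ := h1
  obtain ⟨N2, hN2⟩ := h2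
  refine ⟨max N1 N2 + 3, fun md f hf => ?_⟩
  obtain ⟨g, rfl⟩ : ∃ g, f = g + 1 := ⟨f - 1, by omega⟩
  obtain ⟨g2, rfl⟩ : ∃ g2, g = g2 + 1 := ⟨g - 1, by omega⟩
  obtain ⟨g3, rfl⟩ : ∃ g3, g2 = g3 + 1 := ⟨g2 - 1, by omega⟩
  have hmk : makeTocA (g3 + 1 + 1) toc i (d + 1) nm = (emitStr nm e.1 (d + 1) ++ m1, i1) := by
    rw [makeTocA_step toc nm i (d + 1) e hget (g3 + 1)]
    rw [loopTocA_emit_step toc nm i (d + 1) e hget hi g3 ""]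
    rw [hN1 ("" ++ emitStr nm e.1 (d + 1)) g3 (by omega), String.empty_append]
  rw [loopTocA_push_step toc nm l i d e hget hi hlt (g3 + 1 + 1) md, hmk]
  rw [hN2 (md ++ (emitStr nm e.1 (d + 1) ++ m1)) (g3 + 1 + 1) (by omega)]
  simp [String.append_assoc]

theorem relA_unique (toc : List (String × Int)) (nm : List (String × String)) (l i d : Int)
    (m m' : String) (i' i'' : Int) (h : RelA toc nm l i d m i') (h' : RelA toc nm l i d m' i'') :
    m = m' ∧ i' = i'' := by
  obtain ⟨N, hN⟩ := h
  obtain ⟨N', hN'⟩ := h'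
  have e1 := hN "" (max N N') (le_max_left _ _)
  have e2 := hN' "" (max N N') (le_max_right _ _)
  rw [e1] at e2
  simpa [String.empty_append, Prod.ext_iff] using e2

theorem chainA_exit (toc : List (String × Int)) (nm : List (String × String))
    (S : List Int) (i : Int) (H : ∀ l ∈ S, ∀ d : Int, RelA toc nm l i d "" i) :
    ∀ d : Int, ChainA toc nm S i d "" i := by
  induction S with
  | nil => intro d; exact ChainA.nil i d
  | cons l ls ih =>
    intro d
    have h := ChainA.cons (H l (List.mem_cons_self) d)
      (ih (fun x hx d' => H x (List.mem_cons_of_mem _ hx) d') (d - 1))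
    rwa [String.empty_append] at h

theorem getLast?_last_le (S : List Int) (b : Int) (hsort : S.IsChain (· > ·))
    (hlast : S.getLast? = some b) : ∀ l ∈ S, b ≤ l := by
  induction S with
  | nil => simp at hlast
  | cons x xs ih =>
    cases xs with
    | nil =>
      simp at hlast
      intro l hl; simp at hl; omega
    | cons y ys =>
      rw [List.getLast?_cons_cons] at hlast
      rw [List.isChain_cons_cons] at hsort
      have hy := ih hsort.2 hlast
      intro l hl
      rcases List.mem_cons.1 hl with rfl | hl
      · have := hy y (List.mem_cons_self); omega
      · exact hy l hl

theorem getLast?_dropWhile (p : Int → Bool) (S : List Int) (b : Int)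
    (hlast : S.getLast? = some b) (hb : p b = false) :
    (S.dropWhile p).getLast? = some b := by
  induction S with
  | nil => simp at hlast
  | cons x xs ih =>
    cases hx : p x with
    | false => simp [List.dropWhile_cons, hx, hlast]
    | true =>
      cases xs with
      | nil => simp at hlast; subst hlast; rw [hx] at hb; simp at hb
      | cons y ys =>
        rw [List.getLast?_cons_cons] at hlast
        rw [List.dropWhile_cons, if_pos (by simp [hx])]
        exact ih hlast

theorem headD_dropWhile_false (p : Int → Bool) (S : List Int) (x : Int)
    (hne : S.dropWhile p ≠ []) : p ((S.dropWhile p).headD x) = false := by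
  induction S with
  | nil => simp at hne
  | cons y ys ih =>
    cases hy : p y with
    | false => simp [List.dropWhile_cons, hy]
    | true =>
      rw [List.dropWhile_cons, if_pos (by simp [hy])] at hne ⊢
      exact ih hne

-- the new stack after B consumes one item of indent cur
def pvStep (S : List Int) (cur : Int) : List Int :=
  let s1 := S.dropWhile (fun l => decide (cur < l))
  if s1.headD cur < cur then cur :: s1 else s1

-- A's frame chain makes exactly B's one-item step
theorem chainA_step (toc : List (String × Int)) (nm : List (String × String))
    (i : Int) (e : String × Int) (hget : PySem.List.pyGet? toc i = some e)
    (hi : i < (toc.length : Int)) :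
    ∀ (S : List Int), S.IsChain (· > ·) → ∀ b, S.getLast? = some b → b ≤ e.2 →
    ∀ (d0 : Int) (m'' : String) (i' : Int),
    ChainA toc nm (pvStep S e.2) (i + 1) (d0 + ((pvStep S e.2).length : Int) - 1) m'' i' →
    ChainA toc nm S i (d0 + (S.length : Int) - 1)
      (emitStr nm e.1 (d0 + ((pvStep S e.2).length : Int) - 1) ++ m'') i' := by
  intro S
  induction S with
  | nil => intro _ b hl; simp at hl
  | cons l rest ih =>
    intro hsort b hlast hble d0 m'' i' hch
    by_cases hpop : e.2 < l
    · -- A's frame l exits at i; B pops level l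
      obtain ⟨y, ys, rfl⟩ : ∃ y ys, rest = y :: ys := by
        cases rest with
        | nil => exfalso; simp at hlast; omega
        | cons y ys => exact ⟨y, ys, rfl⟩
      have hdw : List.dropWhile (fun x => decide (e.2 < x)) (l :: y :: ys)
          = List.dropWhile (fun x => decide (e.2 < x)) (y :: ys) := by
        rw [List.dropWhile_cons, if_pos (by simp [hpop])]
      have hstep : pvStep (l :: y :: ys) e.2 = pvStep (y :: ys) e.2 := by
        simp only [pvStep]; rw [hdw]
      have hlast' : (y :: ys).getLast? = some b := by
        rwa [List.getLast?_cons_cons] at hlast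
      have hsort' : (y :: ys).IsChain (· > ·) := ((List.isChain_cons_cons).1 hsort).2
      rw [hstep] at hch
      have hres := ih hsort' b hlast' hble d0 m'' i' hch
      have hrel := relA_exit_low toc nm l i (d0 + (((l :: y :: ys).length : Nat) : Int) - 1) e hget hi hpop
      have hdep : d0 + (((y :: ys).length : Nat) : Int) - 1
          = (d0 + (((l :: y :: ys).length : Nat) : Int) - 1) - 1 := by
        simp only [List.length_cons]; push_cast; ring
      rw [hdep] at hres
      have hc := ChainA.cons hrel hres
      rwa [String.empty_append, ← hstep] at hc
    · have hstep1 : (l :: rest).dropWhile (fun x => decide (e.2 < x)) = l :: rest := by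
        rw [List.dropWhile_cons, if_neg (by simp [hpop])]
      by_cases hpush : l < e.2
      · -- A opens a new frame for the deeper indent; B pushes e.2
        have hstep : pvStep (l :: rest) e.2 = e.2 :: l :: rest := by
          simp only [pvStep]; rw [hstep1]
          simp only [List.headD_cons]
          rw [if_pos hpush]
        rw [hstep] at hch ⊢
        cases hch with
        | @cons _ _ _ _ m1 i1 mr ir h1 hch2 =>
          cases hch2 with
          | @cons _ _ _ _ m2 i2 m3 i3 h2 hch3 =>
            have hd1 : d0 + (((e.2 :: l :: rest).length : Nat) : Int) - 1
                = (d0 + (((l :: rest).length : Nat) : Int) - 1) + 1 := by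
              simp only [List.length_cons]; push_cast; ring
            rw [hd1] at h1 h2 hch3 ⊢
            rw [show (d0 + (((l :: rest).length : Nat) : Int) - 1) + 1 - 1
                = d0 + (((l :: rest).length : Nat) : Int) - 1 by ring] at h2 hch3
            have hrel := relA_push toc nm l i (d0 + (((l :: rest).length : Nat) : Int) - 1) e hget hi hpush
              m1 i1 h1 m2 i2 h2
            have hc := ChainA.cons hrel hch3
            have hs : ((emitStr nm e.1 ((d0 + (((l :: rest).length : Nat) : Int) - 1) + 1) ++ m1) ++ m2) ++ m3
                = emitStr nm e.1 ((d0 + (((l :: rest).length : Nat) : Int) - 1) + 1) ++ (m1 ++ (m2 ++ m3)) := by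
              simp [String.append_assoc]
            rwa [hs] at hc
      · -- same level: A's frame l emits the item itself; B's stack is unchanged
        have heq : e.2 = l := by omega
        have hstep : pvStep (l :: rest) e.2 = l :: rest := by
          simp only [pvStep]; rw [hstep1]
          simp only [List.headD_cons]
          rw [if_neg hpush]
        rw [hstep] at hch ⊢
        cases hch with
        | @cons _ _ _ _ m1 i1 m2 i2 h1 hch2 =>
          have hrel := relA_emit toc nm l i (d0 + (((l :: rest).length : Nat) : Int) - 1) e hget hi heq
            m1 i1 h1
          have hc := ChainA.cons hrel hch2
          rwa [String.append_assoc] at hc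

theorem loopA_total (toc : List (String × Int)) (nm : List (String × String)) (k : Nat) :
    ∀ i : Int, (((toc.length : Int) - i).toNat = k) → -(toc.length : Int) ≤ i →
    ∀ l d : Int, ∃ (m : String) (i' : Int), i ≤ i' ∧ -(toc.length : Int) ≤ i' ∧
      ∀ (md : String) (f : Nat), 4 * k + 2 ≤ f → loopTocA f toc l i d nm md = (md ++ m, i') := by
  induction k using Nat.strong_induction_on with
  | _ k ih =>
    intro i hk hi l d
    by_cases hin : i < (toc.length : Int)
    · obtain ⟨e, hget⟩ := pyGet?_some_of_range toc i hi hin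
      obtain ⟨k', rfl⟩ : ∃ k', k = k' + 1 := ⟨k - 1, by omega⟩
      rcases lt_trichotomy e.2 l with hlt | heq | hgt
      · refine ⟨"", i, le_refl i, hi, fun md f hf => ?_⟩
        obtain ⟨g, rfl⟩ : ∃ g, f = g + 1 := ⟨f - 1, by omega⟩
        rw [loopTocA_exit_low_step toc nm l i d e hget hin hlt, String.append_empty]
      · subst heq
        obtain ⟨m1, i1, hle1, hm1, hrec1⟩ := ih k' (by omega) (i + 1) (by omega) (by omega) e.2 d
        refine ⟨emitStr nm e.1 d ++ m1, i1, by omega, hm1, fun md f hf => ?_⟩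
        obtain ⟨g, rfl⟩ : ∃ g, f = g + 1 := ⟨f - 1, by omega⟩
        rw [loopTocA_emit_step toc nm i d e hget hin g md]
        rw [hrec1 (md ++ emitStr nm e.1 d) g (by omega), String.append_assoc]
      · obtain ⟨m1, i1, hle1, hm1, hrec1⟩ := ih k' (by omega) (i + 1) (by omega) (by omega) e.2 (d + 1)
        obtain ⟨m2, i2, hle2, hm2, hrec2⟩ := ih (((toc.length : Int) - i1).toNat) (by omega) i1 rfl hm1 l d
        refine ⟨(emitStr nm e.1 (d + 1) ++ m1) ++ m2, i2, by omega, hm2, fun md f hf => ?_⟩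
        obtain ⟨g3, rfl⟩ : ∃ g3, f = g3 + 1 + 1 + 1 := ⟨f - 3, by omega⟩
        have hmk : makeTocA (g3 + 1 + 1) toc i (d + 1) nm = (emitStr nm e.1 (d + 1) ++ m1, i1) := by
          rw [makeTocA_step toc nm i (d + 1) e hget (g3 + 1),
            loopTocA_emit_step toc nm i (d + 1) e hget hin g3 "",
            hrec1 ("" ++ emitStr nm e.1 (d + 1)) g3 (by omega), String.empty_append]
        rw [loopTocA_push_step toc nm l i d e hget hin hgt (g3 + 1 + 1) md, hmk]
        rw [hrec2 (md ++ (emitStr nm e.1 (d + 1) ++ m1)) (g3 + 1 + 1) (by omega)]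
        simp [String.append_assoc]
    · refine ⟨"", i, le_refl i, hi, fun md f hf => ?_⟩
      obtain ⟨g, rfl⟩ : ∃ g, f = g + 1 := ⟨f - 1, by omega⟩
      rw [loopTocA_exit_high_step toc nm l i d hin, String.append_empty]

theorem loopTocB_exit_high_step (toc : List (String × Int)) (nm : List (String × String))
    (b d0 : Int) (S : List Int) (i : Int) (md : String) (h : ¬ i < (toc.length : Int)) :
    loopTocB toc nm b d0 S i md = (md, i) := by
  rw [loopTocB]; rw [dif_neg h]

theorem loopTocB_exit_low_step (toc : List (String × Int)) (nm : List (String × String))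
    (b d0 : Int) (S : List Int) (i : Int) (md : String) (hi : i < (toc.length : Int))
    (e : String × Int) (hget : PySem.List.pyGet? toc i = some e) (hlt : ¬ b ≤ e.2) :
    loopTocB toc nm b d0 S i md = (md, i) := by
  rw [loopTocB]; rw [dif_pos hi, hget]; simp only []
  rw [if_neg hlt]

theorem loopTocB_step (toc : List (String × Int)) (nm : List (String × String))
    (b d0 : Int) (S : List Int) (i : Int) (md : String) (hi : i < (toc.length : Int))
    (e : String × Int) (hget : PySem.List.pyGet? toc i = some e) (hble : b ≤ e.2) :
    loopTocB toc nm b d0 S i md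
      = loopTocB toc nm b d0 (pvStep S e.2) (i + 1)
          (md ++ emitStr nm e.1 (d0 + ((pvStep S e.2).length : Int) - 1)) := by
  conv_lhs => rw [loopTocB]
  rw [dif_pos hi, hget]; simp only []
  rw [if_pos hble]
  simp only [pvStep]
  rw [md2_eq nm e.1 _ md]

theorem loopB_sim (toc : List (String × Int)) (nm : List (String × String)) (k : Nat) :
    ∀ i : Int, (((toc.length : Int) - i).toNat = k) → -(toc.length : Int) ≤ i →
    ∀ (S : List Int) (b : Int), S.getLast? = some b → S.IsChain (· > ·) →
    ∀ (d0 : Int) (md : String), ∃ (m : String) (i' : Int),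
      loopTocB toc nm b d0 S i md = (md ++ m, i') ∧
      ChainA toc nm S i (d0 + (S.length : Int) - 1) m i' := by
  induction k using Nat.strong_induction_on with
  | _ k ih =>
    intro i hk hi S b hlast hsort d0 md
    have hSne : S ≠ [] := by intro h; rw [h] at hlast; simp at hlast
    by_cases hin : i < (toc.length : Int)
    · obtain ⟨e, hget⟩ := pyGet?_some_of_range toc i hi hin
      by_cases hble : b ≤ e.2
      · -- consume one item
        obtain ⟨k', rfl⟩ : ∃ k', k = k' + 1 := ⟨k - 1, by omega⟩
        have hlast1 : (S.dropWhile (fun l => decide (e.2 < l))).getLast? = some b :=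
          getLast?_dropWhile _ S b hlast (by simp; omega)
        have hs1ne : S.dropWhile (fun l => decide (e.2 < l)) ≠ [] := by
          intro h; rw [h] at hlast1; simp at hlast1
        have hs1chain : (S.dropWhile (fun l => decide (e.2 < l))).IsChain (· > ·) :=
          hsort.sublist (List.dropWhile_sublist _)
        have hhd := headD_dropWhile_false (fun l => decide (e.2 < l)) S e.2 hs1ne
        have hlast2 : (pvStep S e.2).getLast? = some b := by
          simp only [pvStep]
          split
          · obtain ⟨h1, t, ht⟩ : ∃ h1 t, S.dropWhile (fun l => decide (e.2 < l)) = h1 :: t := by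
              cases hdw : S.dropWhile (fun l => decide (e.2 < l)) with
              | nil => exact absurd hdw hs1ne
              | cons h1 t => exact ⟨h1, t, rfl⟩
            rw [ht, List.getLast?_cons_cons, ← ht]; exact hlast1
          · exact hlast1
        have hchain2 : (pvStep S e.2).IsChain (· > ·) := by
          simp only [pvStep]
          split
          · rename_i hp
            obtain ⟨h1, t, ht⟩ : ∃ h1 t, S.dropWhile (fun l => decide (e.2 < l)) = h1 :: t := by
              cases hdw : S.dropWhile (fun l => decide (e.2 < l)) with
              | nil => exact absurd hdw hs1ne
              | cons h1 t => exact ⟨h1, t, rfl⟩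
            rw [ht]
            rw [ht] at hp hs1chain
            simp only [List.headD_cons] at hp
            exact (List.isChain_cons_cons).2 ⟨hp, hs1chain⟩
          · exact hs1chain
        obtain ⟨m'', i', hB, hchain⟩ := ih k' (by omega) (i + 1) (by omega) (by omega)
          (pvStep S e.2) b hlast2 hchain2 d0
          (md ++ emitStr nm e.1 (d0 + ((pvStep S e.2).length : Int) - 1))
        refine ⟨emitStr nm e.1 (d0 + ((pvStep S e.2).length : Int) - 1) ++ m'', i', ?_, ?_⟩
        · rw [loopTocB_step toc nm b d0 S i md hin e hget hble, hB, String.append_assoc]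
        · exact chainA_step toc nm i e hget hin S hsort b hlast hble d0 m'' i' hchain
      · -- item dips below base: stop
        refine ⟨"", i, ?_, ?_⟩
        · rw [loopTocB_exit_low_step toc nm b d0 S i md hin e hget hble, String.append_empty]
        · refine chainA_exit toc nm S i (fun l hl d => ?_) _
          have hb := getLast?_last_le S b hsort hlast l hl
          exact relA_exit_low toc nm l i d e hget hin (by omega)
    · -- ran off the end of toc_links: stop
      refine ⟨"", i, ?_, ?_⟩
      · rw [loopTocB_exit_high_step toc nm b d0 S i md hin, String.append_empty]
      · exact chainA_exit toc nm S i (fun l hl d => relA_exit_high toc nm l i d hin) _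

-- ===== VERDICT (by name: the statement is the Claim_ definition above) =====
theorem make_toc_spec : Claim_equal_make_toc := by
  unfold Claim_equal_make_toc
  intro toc idx depth nm _hdom hpre
  obtain ⟨h1, h2⟩ := hpre
  unfold Spec_make_toc make_toc make_toc_alt
  obtain ⟨e, hget⟩ := pyGet?_some_of_range toc idx h1 h2
  rw [hget]
  show makeTocA (8 * toc.length + 9) toc idx depth nm = loopTocB toc nm e.2 depth [e.2] idx ""
  obtain ⟨m, i', hle, hm, hrec⟩ :=
    loopA_total toc nm (((toc.length : Int) - idx).toNat) idx rfl h1 e.2 depth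
  obtain ⟨mB, i'B, hB, hchain⟩ :=
    loopB_sim toc nm (((toc.length : Int) - idx).toNat) idx rfl h1 [e.2] e.2 (by simp) (by simp)
      depth ""
  rw [hB]
  cases hchain with
  | @cons _ _ _ _ m1 i1 m2 i2 hrel1 hchain2 =>
    cases hchain2
    rw [show depth + (([e.2].length : Nat) : Int) - 1 = depth by simp] at hrel1
    have huniq := relA_unique toc nm e.2 idx depth m m1 _ _ ⟨4 * (((toc.length : Int) - idx).toNat) + 2, hrec⟩ hrel1
    rw [show 8 * toc.length + 9 = (8 * toc.length + 8) + 1 from rfl,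
      makeTocA_step toc nm idx depth e hget (8 * toc.length + 8)]
    rw [hrec "" (8 * toc.length + 8) (by omega)]
    rw [huniq.1, huniq.2, String.append_empty]
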